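-- pv_equiv track=rewrite | github.com/alumnos-ingcom/python-1-teopatagonico | src/ejercicio2.py | signo
-- ===== SOURCE A (Python) =====
-- def signo(numero):
--     """
--     Precondiciones: El valor de entrada debe ser un numero entero
--     Poscondiciones: El valor de salida debe ser un numero entero
--     entre -1 y 1
--     """
--     contador=numero
--     i=0
--     while i<numero:
--         contador=contador-1
--         i+=1
--     while i>numero:
--         contador=contador-1
--         i-=1
--     if i==0:
--         signo=0
--     else:
--         if contador==0:
--             signo=1
--         else:
--             signo=-1
--     return signo
-- ===== SOURCE B (Python) =====
-- def signo(numero):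
--     """O(1) sign by direct comparison of numero to 0."""
--     if numero > 0:
--         return 1
--     if numero < 0:
--         return -1
--     return 0
-- ===== Notes on version B (the rewrite author's own statement) =====
-- stated objective: faster
-- what changed: Replaced the two O(|n|) counting loops with a direct three-way comparison of numero to 0.
import Mathlib
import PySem

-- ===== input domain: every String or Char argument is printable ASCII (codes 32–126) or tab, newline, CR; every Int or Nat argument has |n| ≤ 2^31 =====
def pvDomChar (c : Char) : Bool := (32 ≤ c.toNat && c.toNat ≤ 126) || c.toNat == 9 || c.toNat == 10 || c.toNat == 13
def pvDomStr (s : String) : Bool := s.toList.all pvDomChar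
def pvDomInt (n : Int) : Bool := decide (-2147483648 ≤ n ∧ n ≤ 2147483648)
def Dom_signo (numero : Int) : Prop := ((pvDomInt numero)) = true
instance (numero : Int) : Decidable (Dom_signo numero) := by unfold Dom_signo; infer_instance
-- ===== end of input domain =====

-- B replaces A's two O(|n|) counting loops with a direct comparison to 0 (faster: asymptotic).

-- ===== PORT A =====
-- while i < numero: contador -= 1; i += 1
def signoLoop1 (numero contador i : Int) : Int × Int :=
  if i < numero then signoLoop1 numero (contador - 1) (i + 1) else (contador, i)
termination_by (numero - i).toNat
decreasing_by omega

-- while i > numero: contador -= 1; i -= 1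
def signoLoop2 (numero contador i : Int) : Int × Int :=
  if i > numero then signoLoop2 numero (contador - 1) (i - 1) else (contador, i)
termination_by (i - numero).toNat
decreasing_by omega

def signo (numero : Int) : Int :=
  let s1 := signoLoop1 numero numero 0
  let s2 := signoLoop2 numero s1.1 s1.2
  if s2.2 == 0 then 0
  else if s2.1 == 0 then 1
  else -1

-- ===== PORT B =====
def signo_alt (numero : Int) : Int :=
  if numero > 0 then 1
  else if numero < 0 then -1
  else 0

-- ===== PRECONDITION & SPEC =====
def Spec_signo (numero : Int) (out : Int) : Prop := out = signo_alt numero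
instance (numero : Int) (out : Int) : Decidable (Spec_signo numero out) := by unfold Spec_signo; infer_instance

-- ===== CLAIM (what is proved, stated in full; the proofs are below) =====
def Claim_equal_signo : Prop := ∀ (numero : Int), Dom_signo numero → Spec_signo numero (signo numero)

-- ===== LEMMAS AND PROOFS =====
theorem signoLoop1_run (n : ℕ) : ∀ (numero contador i : Int), (numero - i).toNat = n → i ≤ numero →
    signoLoop1 numero contador i = (contador - (numero - i), numero) := by
  induction n with
  | zero =>
    intro numero contador i h hle
    have : i = numero := by omega
    subst this
    rw [signoLoop1]
    simp
  | succ k ih =>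
    intro numero contador i h hle
    have hlt : i < numero := by omega
    rw [signoLoop1, if_pos hlt, ih numero (contador - 1) (i + 1) (by omega) (by omega)]
    congr 1
    ring

theorem signoLoop2_run (n : ℕ) : ∀ (numero contador i : Int), (i - numero).toNat = n → numero ≤ i →
    signoLoop2 numero contador i = (contador - (i - numero), numero) := by
  induction n with
  | zero =>
    intro numero contador i h hle
    have : i = numero := by omega
    subst this
    rw [signoLoop2]
    simp
  | succ k ih =>
    intro numero contador i h hle
    have hlt : numero < i := by omega
    rw [signoLoop2, if_pos hlt, ih numero (contador - 1) (i - 1) (by omega) (by omega)]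
    congr 1
    ring

theorem signoLoop1_noop (numero contador i : Int) (h : numero ≤ i) :
    signoLoop1 numero contador i = (contador, i) := by
  rw [signoLoop1, if_neg (by omega)]

theorem signoLoop2_noop (numero contador i : Int) (h : i ≤ numero) :
    signoLoop2 numero contador i = (contador, i) := by
  rw [signoLoop2, if_neg (by omega)]

theorem signo_eval (numero : Int) : signo numero = signo_alt numero := by
  unfold signo signo_alt
  dsimp only
  rcases lt_trichotomy numero 0 with h | h | h
  · rw [signoLoop1_noop numero numero 0 (by omega),
        signoLoop2_run (0 - numero).toNat numero numero 0 rfl (by omega)]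
    simp only [beq_iff_eq]
    split_ifs <;> omega
  · subst h
    rw [signoLoop1_noop 0 0 0 (by omega), signoLoop2_noop 0 0 0 (by omega)]
    simp
  · rw [signoLoop1_run (numero - 0).toNat numero numero 0 rfl (by omega),
        signoLoop2_noop numero (numero - (numero - 0)) numero (by omega)]
    simp only [beq_iff_eq]
    split_ifs <;> omega

-- ===== VERDICT (by name: the statement is the Claim_ definition above) =====
theorem signo_spec : Claim_equal_signo := by
  intro numero _
  exact signo_eval numero
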